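-- pv_equiv track=rewrite | github.com/bpucker/PBBtools | cds_finder/CDS_finder.py | get_cds_candidates_per_frame
-- ===== SOURCE A (Python) =====
-- def get_cds_candidates_per_frame( seq, atg_status ):
-- 	"""! @brief identify all possible CDS in given reading frame """
--
-- 	candidates = []
-- 	codons = [ seq[i:i+3] for i in range( 0, len( seq ), 3 ) ]
-- 	current_seq = []
-- 	for codon in codons:
-- 		if codon in [ "TAA", "TGA", "TAG" ]:
-- 			current_seq.append( codon )
-- 			candidates.append( "".join( current_seq ) )
-- 			current_seq = []
-- 		else:
-- 			if len( current_seq ) > 0: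
-- 				current_seq.append( codon )
-- 			elif atg_status == True and codon == "ATG":
-- 				current_seq.append( codon )
-- 	if len( current_seq ) > 0:
-- 		candidates.append( "".join( current_seq ) )
-- 	return candidates
-- ===== SOURCE B (Python) =====
-- def get_cds_candidates_per_frame(seq, atg_status):
--     """Group-first re-implementation: cut the codon list at each stop codon,
--     then map each stop-terminated group (and the trailing leftover) to its candidate."""
--     stops = ("TAA", "TGA", "TAG")
--     codons = [seq[i:i + 3] for i in range(0, len(seq), 3)]
--     candidates = []
--     rest = codons
--     while True:
--         i = next((k for k, c in enumerate(rest) if c in stops), None)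
--         if i is None:
--             break
--         group = rest[:i + 1]
--         start = group.index("ATG") if atg_status and "ATG" in group else i
--         candidates.append("".join(group[start:]))
--         rest = rest[i + 1:]
--     if atg_status and "ATG" in rest:
--         candidates.append("".join(rest[rest.index("ATG"):]))
--     return candidates
-- ===== Notes on version B (the rewrite author's own statement) =====
-- stated objective: alternative
-- what changed: Replaces A's single streaming flag-and-buffer state machine with a group-first two-pass: repeatedly cut the codon list at the first stop codon, map each stop-terminated group to its candidate (from its first ATG, or the lone stop), and handle the trailing leftover group separately.
import Mathlib
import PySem

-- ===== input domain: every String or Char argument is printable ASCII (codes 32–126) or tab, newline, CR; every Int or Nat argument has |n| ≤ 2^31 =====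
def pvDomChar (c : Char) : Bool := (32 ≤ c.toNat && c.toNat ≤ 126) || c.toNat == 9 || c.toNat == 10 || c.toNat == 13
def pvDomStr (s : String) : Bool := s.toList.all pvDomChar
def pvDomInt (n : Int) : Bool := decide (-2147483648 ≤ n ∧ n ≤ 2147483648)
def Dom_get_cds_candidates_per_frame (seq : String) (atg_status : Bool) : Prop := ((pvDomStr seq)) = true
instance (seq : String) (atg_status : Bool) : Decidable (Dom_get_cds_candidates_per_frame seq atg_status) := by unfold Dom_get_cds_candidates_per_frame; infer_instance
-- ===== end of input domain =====

-- B replaces A's single flag-and-buffer state machine by a group-first two-pass: repeatedly cut the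
-- codon list at the first stop codon and map each group (and the trailing leftover) to its candidate
-- (objective: alternative decomposition, same cost).


-- ===== PORT A =====
-- A's loop body, named so the proofs can speak about it
def pvStepA (atg_status : Bool) (st : List String × List String) (codon : String) : List String × List String :=
  if codon ∈ ["TAA", "TGA", "TAG"] then
    (st.1 ++ [PySem.Str.join "" (st.2 ++ [codon])], [])
  else if st.2.length > 0 then
    (st.1, st.2 ++ [codon])
  else if atg_status == true && codon == "ATG" then
    (st.1, st.2 ++ [codon])
  else st

def get_cds_candidates_per_frame (seq : String) (atg_status : Bool) : List String :=
  -- codons = [ seq[i:i+3] for i in range(0, len(seq), 3) ]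
  let codons := (PySem.List.pyRange 0 (PySem.Str.len seq) 3).map
      (fun i => PySem.Str.slice seq (some i) (some (i + 3)))
  -- the for-loop: state = (candidates, current_seq)
  let st := codons.foldl (pvStepA atg_status) ([], [])
  if st.2.length > 0 then st.1 ++ [PySem.Str.join "" st.2] else st.1

-- ===== PORT B =====
def pvIsStop (c : String) : Bool := c ∈ ["TAA", "TGA", "TAG"]

-- the `while True` loop of Source B, as recursion on the remaining codon suffix `rest`
def pvEmit (atg_status : Bool) (rest : List String) : List String :=
  match h : rest.findIdx? pvIsStop with
  | none =>
      -- loop exits: trailing leftover group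
      if atg_status && decide ("ATG" ∈ rest) then
        [PySem.Str.join "" (rest.drop ((PySem.List.index? rest "ATG").getD 0))]
      else []
  | some i =>
      let group := rest.take (i + 1)
      let start := if atg_status && decide ("ATG" ∈ group) then
          (PySem.List.index? group "ATG").getD 0
        else i
      PySem.Str.join "" (group.drop start) :: pvEmit atg_status (rest.drop (i + 1))
termination_by rest.length
decreasing_by
  have := (List.findIdx?_eq_some_iff_findIdx_eq.mp h).1
  simp [List.length_drop]; omega

def get_cds_candidates_per_frame_alt (seq : String) (atg_status : Bool) : List String :=
  let codons := (PySem.List.pyRange 0 (PySem.Str.len seq) 3).map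
      (fun i => PySem.Str.slice seq (some i) (some (i + 3)))
  pvEmit atg_status codons

-- ===== PRECONDITION & SPEC =====
def Spec_get_cds_candidates_per_frame (seq : String) (atg_status : Bool) (out : List String) : Prop := out = get_cds_candidates_per_frame_alt seq atg_status
instance (seq : String) (atg_status : Bool) (out : List String) : Decidable (Spec_get_cds_candidates_per_frame seq atg_status out) := by unfold Spec_get_cds_candidates_per_frame; infer_instance

-- ===== CLAIM (what is proved, stated in full; the proofs are below) =====
def Claim_equal_get_cds_candidates_per_frame : Prop := ∀ (seq : String) (atg_status : Bool), Dom_get_cds_candidates_per_frame seq atg_status → Spec_get_cds_candidates_per_frame seq atg_status (get_cds_candidates_per_frame seq atg_status)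

-- ===== LEMMAS AND PROOFS =====

-- A's loop + final flush, recursively, with the emitted candidates in front
def pvRunA (atg_status : Bool) (cur : List String) : List String → List String
  | [] => if cur.length > 0 then [PySem.Str.join "" cur] else []
  | c :: cs =>
      if pvIsStop c then PySem.Str.join "" (cur ++ [c]) :: pvRunA atg_status [] cs
      else if cur.length > 0 then pvRunA atg_status (cur ++ [c]) cs
      else if atg_status == true && c == "ATG" then pvRunA atg_status (cur ++ [c]) cs
      else pvRunA atg_status cur cs

-- B's loop with the current group pre-seeded by a (locked) nonempty prefix `cur`
def pvEmitWith (atg_status : Bool) (cur cs : List String) : List String :=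
  if cur = [] then pvEmit atg_status cs else
  match cs.findIdx? pvIsStop with
  | none => [PySem.Str.join "" (cur ++ cs)]
  | some i => PySem.Str.join "" (cur ++ cs.take (i + 1)) :: pvEmit atg_status (cs.drop (i + 1))

theorem pvFoldA_eq_runA (atg_status : Bool) (cs : List String) (acc cur : List String) :
    (if (cs.foldl (pvStepA atg_status) (acc, cur)).2.length > 0
     then (cs.foldl (pvStepA atg_status) (acc, cur)).1
          ++ [PySem.Str.join "" (cs.foldl (pvStepA atg_status) (acc, cur)).2]
     else (cs.foldl (pvStepA atg_status) (acc, cur)).1)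
    = acc ++ pvRunA atg_status cur cs := by
  induction cs generalizing acc cur with
  | nil => simp only [List.foldl_nil, pvRunA]; split_ifs <;> simp
  | cons c cs ih =>
      simp only [List.foldl_cons, pvRunA, pvStepA, pvIsStop]
      rcases Bool.eq_false_or_eq_true atg_status with hb | hb <;> subst hb <;>
        by_cases h1 : c ∈ ["TAA", "TGA", "TAG"] <;>
          by_cases h2 : cur.length > 0 <;>
            by_cases h3 : c = "ATG" <;>
              simp [h1, h2, h3, ih, List.append_assoc]

theorem pvEmit_none (atg_status : Bool) (cs : List String) (h : cs.findIdx? pvIsStop = none) :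
    pvEmit atg_status cs =
      if atg_status && decide ("ATG" ∈ cs) then
        [PySem.Str.join "" (cs.drop ((PySem.List.index? cs "ATG").getD 0))]
      else [] := by
  rw [pvEmit]
  split <;> simp_all

theorem pvEmit_some (atg_status : Bool) (cs : List String) (i : Nat)
    (h : cs.findIdx? pvIsStop = some i) :
    pvEmit atg_status cs =
      PySem.Str.join "" ((cs.take (i + 1)).drop
        (if atg_status && decide ("ATG" ∈ cs.take (i + 1)) then
          (PySem.List.index? (cs.take (i + 1)) "ATG").getD 0 else i))
      :: pvEmit atg_status (cs.drop (i + 1)) := by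
  rw [pvEmit]
  split <;> simp_all

theorem pvEmitWith_nil_cur (atg_status : Bool) (cs : List String) :
    pvEmitWith atg_status [] cs = pvEmit atg_status cs := by
  simp [pvEmitWith]

theorem pvStop_ne_ATG {c : String} (h : pvIsStop c = true) : c ≠ "ATG" := by
  simp only [pvIsStop, List.mem_cons, decide_eq_true_eq] at h
  rcases h with rfl | rfl | rfl | h <;> simp_all

theorem pvRunA_eq_emitWith (atg_status : Bool) (cs : List String) : ∀ cur,
    pvRunA atg_status cur cs = pvEmitWith atg_status cur cs := by
  induction cs with
  | nil =>
      intro cur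
      have he : pvEmit atg_status [] = [] := by rw [pvEmit_none] <;> simp
      cases cur <;> simp [pvRunA, pvEmitWith, he]
  | cons c cs ih =>
      intro cur
      by_cases hstop : pvIsStop c = true
      · -- stop codon: emits cur ++ [c], resets
        have hf : (c :: cs).findIdx? pvIsStop = some 0 := by
          simp [List.findIdx?_cons, hstop]
        have hATG : ("ATG" ∈ [c]) = False := by
          simp [pvStop_ne_ATG hstop, eq_comm]
        rw [pvRunA, if_pos hstop, ih]
        by_cases hcur : cur = []
        · subst hcur
          rw [pvEmitWith_nil_cur, pvEmitWith_nil_cur, pvEmit_some atg_status (c :: cs) 0 hf]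
          simp [hATG]
        · simp only [pvEmitWith, if_neg hcur, hf]
          simp
      · -- not a stop codon
        by_cases hcur : cur = []
        · subst hcur
          by_cases hatg : (atg_status == true && c == "ATG") = true
          · -- start of a candidate
            obtain ⟨ha, hc⟩ := Bool.and_eq_true_iff.mp hatg
            have ha' : atg_status = true := by simpa using ha
            have hc' : c = "ATG" := by simpa using hc
            subst ha' hc'
            rw [pvRunA, if_neg (by simp [hstop]), if_neg (by simp), if_pos (by simp), ih]
            cases hf : cs.findIdx? pvIsStop with
            | none =>
                have hf' : ("ATG" :: cs).findIdx? pvIsStop = none := by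
                  simp [List.findIdx?_cons, hstop, hf]
                rw [pvEmitWith_nil_cur, pvEmit_none _ _ hf', PySem.List.index?_cons_self]
                simp [pvEmitWith, hf]
            | some i =>
                have hf' : ("ATG" :: cs).findIdx? pvIsStop = some (i + 1) := by
                  simp [List.findIdx?_cons, hstop, hf]
                rw [pvEmitWith_nil_cur, pvEmit_some _ _ (i + 1) hf']
                simp only [pvEmitWith, hf, List.take_succ_cons, List.drop_succ_cons]
                rw [PySem.List.index?_cons_self]
                simp
          · -- skipped codon
            rw [pvRunA, if_neg (by simp [hstop]), if_neg (by simp), if_neg hatg, ih,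
               pvEmitWith_nil_cur, pvEmitWith_nil_cur]
            -- show pvEmit (c :: cs) = pvEmit cs
            cases hf : cs.findIdx? pvIsStop with
            | none =>
                have hf' : (c :: cs).findIdx? pvIsStop = none := by
                  simp [List.findIdx?_cons, hstop, hf]
                rw [pvEmit_none _ _ hf', pvEmit_none _ _ hf]
                by_cases hatg2 : atg_status = true
                · subst hatg2
                  have hc : c ≠ "ATG" := by intro h; subst h; simp at hatg
                  have hmem : ("ATG" ∈ c :: cs) ↔ ("ATG" ∈ cs) := by simp [Ne.symm hc]
                  by_cases hm : "ATG" ∈ cs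
                  · obtain ⟨k, hk⟩ := Option.isSome_iff_exists.mp
                      ((PySem.List.index?_isSome_iff cs "ATG").mpr hm)
                    rw [PySem.List.index?_cons_of_ne cs hc, hk]
                    simp [hmem, hm, List.drop_succ_cons]
                  · simp [hmem, hm]
                · simp [hatg2]
            | some i =>
                have hf' : (c :: cs).findIdx? pvIsStop = some (i + 1) := by
                  simp [List.findIdx?_cons, hstop, hf]
                rw [pvEmit_some _ _ (i + 1) hf', pvEmit_some _ _ i hf]
                simp only [List.take_succ_cons, List.drop_succ_cons]
                by_cases hatg2 : atg_status = true
                · subst hatg2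
                  have hc : c ≠ "ATG" := by intro h; subst h; simp at hatg
                  have hmem : ("ATG" ∈ c :: cs.take (i + 1)) ↔ ("ATG" ∈ cs.take (i + 1)) := by
                    simp [Ne.symm hc]
                  by_cases hm : "ATG" ∈ cs.take (i + 1)
                  · obtain ⟨k, hk⟩ := Option.isSome_iff_exists.mp
                      ((PySem.List.index?_isSome_iff (cs.take (i + 1)) "ATG").mpr hm)
                    rw [PySem.List.index?_cons_of_ne _ hc, hk]
                    simp [hmem, hm, List.drop_succ_cons]
                  · simp [hmem, hm, List.drop_succ_cons]
                · simp [hatg2]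
        · -- locked: cur nonempty, append c
          have hlen : cur.length > 0 := by cases cur <;> simp_all
          rw [pvRunA, if_neg (by simp [hstop]), if_pos hlen, ih]
          have hne : cur ++ [c] ≠ [] := by simp
          simp only [pvEmitWith, if_neg hne, if_neg hcur]
          cases hf : cs.findIdx? pvIsStop with
          | none =>
              have hf' : (c :: cs).findIdx? pvIsStop = none := by
                simp [List.findIdx?_cons, hstop, hf]
              simp [hf', List.append_assoc]
          | some i =>
              have hf' : (c :: cs).findIdx? pvIsStop = some (i + 1) := by
                simp [List.findIdx?_cons, hstop, hf]
              simp [hf', List.take_succ_cons, List.drop_succ_cons, List.append_assoc]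

-- ===== VERDICT (by name: the statement is the Claim_ definition above) =====
theorem get_cds_candidates_per_frame_spec : Claim_equal_get_cds_candidates_per_frame := by
  intro seq atg_status _
  unfold Spec_get_cds_candidates_per_frame get_cds_candidates_per_frame get_cds_candidates_per_frame_alt
  rw [pvFoldA_eq_runA, pvRunA_eq_emitWith]
  simp [pvEmitWith]
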